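-- pv_equiv track=rewrite | github.com/arian81/leetcode | 1829 Maximum XOR for Each Query/1829maximum-xor-for-each-query.py | getMaximumXor
-- ===== SOURCE A (Python) =====
-- from typing import List
--
-- def getMaximumXor(nums: List[int], maximumBit: int) -> List[int]:
--     presum = [nums[0]]
--     for i in range(1,len(nums)):
--         presum.append(nums[i] ^ presum[i-1])
--     res = []
--     for i in presum:
--         # curr_max = (-1,0)
--         # for k in range(2**maximumBit):
--         #     calc = i ^ k
--         #     if calc > curr_max[1]:
--         #         curr_max = (k, calc)
--
--         res.append(i ^ (2 ** maximumBit - 1))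
--     return list(reversed(res))
-- ===== SOURCE B (Python) =====
-- def getMaximumXor(nums, maximumBit):
--     total = nums[0]
--     for x in nums[1:]:
--         total ^= x
--     mask = 2 ** maximumBit - 1
--     res = []
--     for x in reversed(nums):
--         res.append(total ^ mask)
--         total ^= x
--     return res
-- ===== Notes on version B (the rewrite author's own statement) =====
-- stated objective: simpler
-- what changed: B keeps a single running XOR accumulator (total of all nums) and peels elements off the back while emitting answers directly in final order, instead of materialising a prefix-XOR array, mapping over it and reversing.
import Mathlib
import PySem

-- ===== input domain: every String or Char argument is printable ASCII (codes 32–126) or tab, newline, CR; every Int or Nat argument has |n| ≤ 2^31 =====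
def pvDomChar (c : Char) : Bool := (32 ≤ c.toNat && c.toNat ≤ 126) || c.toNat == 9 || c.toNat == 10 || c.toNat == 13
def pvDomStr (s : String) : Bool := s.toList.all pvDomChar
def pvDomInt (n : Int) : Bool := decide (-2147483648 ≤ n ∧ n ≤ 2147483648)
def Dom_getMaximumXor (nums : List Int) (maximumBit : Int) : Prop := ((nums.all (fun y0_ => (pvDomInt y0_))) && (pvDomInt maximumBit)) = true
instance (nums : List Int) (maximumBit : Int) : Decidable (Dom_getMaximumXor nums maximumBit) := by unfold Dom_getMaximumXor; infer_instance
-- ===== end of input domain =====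

-- B replaces A's prefix-XOR array + map + reverse by one running accumulator peeled from the back,
-- emitting the answers directly in final order (simpler, O(1) extra space besides the output).


-- ===== PORT A =====
-- presum = [nums[0]]; for i in range(1,len(nums)): presum.append(nums[i] ^ presum[i-1])
-- res = []; for i in presum: res.append(i ^ (2**maximumBit - 1)); return list(reversed(res))
-- nums[0] raises IndexError on empty nums and maximumBit < 0 makes 2**maximumBit a float so
-- i ^ … raises TypeError; both are excluded by Pre_, so toNat on the exponent is exact here.
def getMaximumXor (nums : List Int) (maximumBit : Int) : List Int :=
  match nums with
  | [] => []   -- Python raises IndexError here; outside Pre_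
  | x :: rest =>
    let presum := (PySem.List.pyRange 1 ((x :: rest).length : Int) 1).foldl
      (fun presum i =>
        presum ++ [PySem.Int.bxor (PySem.List.pyGetD (x :: rest) i 0)
                                  (PySem.List.pyGetD presum (i - 1) 0)])
      [x]
    let res := presum.foldl
      (fun res i => res ++ [PySem.Int.bxor i ((2 : Int) ^ maximumBit.toNat - 1)]) []
    res.reverse

-- ===== PORT B =====
-- total = nums[0]; for x in nums[1:]: total ^= x
-- mask = 2**maximumBit - 1
-- res = []; for x in reversed(nums): res.append(total ^ mask); total ^= x
-- return res
def getMaximumXor_alt (nums : List Int) (maximumBit : Int) : List Int :=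
  match nums with
  | [] => []   -- Python raises IndexError here; outside Pre_
  | x :: rest =>
    let total := (PySem.List.slice (x :: rest) (some 1) none).foldl
      (fun t y => PySem.Int.bxor t y) x
    let mask : Int := (2 : Int) ^ maximumBit.toNat - 1
    ((x :: rest).reverse.foldl
      (fun (st : Int × List Int) y => (PySem.Int.bxor st.1 y, st.2 ++ [PySem.Int.bxor st.1 mask]))
      (total, [])).2

-- ===== PRECONDITION & SPEC =====
-- Pre_ excludes exactly the inputs on which Python A raises: empty nums (IndexError on nums[0])
-- and maximumBit < 0 (2**maximumBit is a float, so i ^ … raises TypeError).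
def Pre_getMaximumXor (nums : List Int) (maximumBit : Int) : Prop :=
  nums ≠ [] ∧ 0 ≤ maximumBit
instance (nums : List Int) (maximumBit : Int) : Decidable (Pre_getMaximumXor nums maximumBit) := by
  unfold Pre_getMaximumXor; infer_instance
def pvWitness_getMaximumXor : List Int × Int := ([0, 1, 1, 3], 2)

def Spec_getMaximumXor (nums : List Int) (maximumBit : Int) (out : List Int) : Prop := out = getMaximumXor_alt nums maximumBit
instance (nums : List Int) (maximumBit : Int) (out : List Int) : Decidable (Spec_getMaximumXor nums maximumBit out) := by unfold Spec_getMaximumXor; infer_instance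

-- ===== CLAIM (what is proved, stated in full; the proofs are below) =====
def Claim_equal_getMaximumXor : Prop := ∀ (nums : List Int) (maximumBit : Int), Dom_getMaximumXor nums maximumBit → Pre_getMaximumXor nums maximumBit → Spec_getMaximumXor nums maximumBit (getMaximumXor nums maximumBit)

-- ===== LEMMAS AND PROOFS =====

theorem pv_bxor_cancel (a b : Int) : PySem.Int.bxor (PySem.Int.bxor a b) b = a := by
  unfold PySem.Int.bxor
  by_cases ha : 0 ≤ a <;> by_cases hb : 0 ≤ b <;> simp [ha, hb] <;> omega

-- prefix XORs: pvPxs a l = [a, a^l0, a^l0^l1, …]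
def pvPxs : Int → List Int → List Int
  | a, [] => [a]
  | a, y :: ys => a :: pvPxs (PySem.Int.bxor a y) ys

theorem pvPxs_append (a : Int) (l : List Int) (y : Int) :
    pvPxs a (l ++ [y]) = pvPxs a l ++ [PySem.Int.bxor (l.foldl PySem.Int.bxor a) y] := by
  induction l generalizing a with
  | nil => simp [pvPxs]
  | cons z zs ih => simp [pvPxs, ih, List.foldl]

theorem pvPxs_last (a : Int) (l : List Int) :
    PySem.List.pyGetD (pvPxs a l) (l.length : Int) 0 = l.foldl PySem.Int.bxor a := by
  induction l generalizing a with
  | nil => simp [pvPxs, PySem.List.pyGetD_zero_cons]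
  | cons y ys ih =>
    simp only [pvPxs, List.foldl]
    rw [show ((y :: ys).length : Int) = ((ys.length + 1 : Nat) : Int) by simp,
        PySem.List.pyGetD_natCast]
    simp only [List.getD, List.getElem?_cons_succ]
    simpa using ih (PySem.Int.bxor a y)

theorem pvFoldl_append_map (g : Int → Int) (l : List Int) (acc : List Int) :
    l.foldl (fun r i => r ++ [g i]) acc = acc ++ l.map g := by
  induction l generalizing acc with
  | nil => simp
  | cons y ys ih => simp [ih]

-- A's index loop builds the prefix-XOR list
theorem pvA_presum (x : Int) (rest : List Int) (k : Nat) (hk : k ≤ rest.length) :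
    (PySem.List.pyRange 1 (1 + (k : Int)) 1).foldl
      (fun presum i =>
        presum ++ [PySem.Int.bxor (PySem.List.pyGetD (x :: rest) i 0)
                                  (PySem.List.pyGetD presum (i - 1) 0)])
      [x] = pvPxs x (rest.take k) := by
  induction k with
  | zero => simp [PySem.List.pyRange_one_eq_nil, pvPxs]
  | succ k ih =>
    have hk' : k ≤ rest.length := Nat.le_of_succ_le hk
    have hsplit : PySem.List.pyRange 1 (1 + ((k + 1 : Nat) : Int)) 1
        = PySem.List.pyRange 1 (1 + (k : Int)) 1 ++ [1 + (k : Int)] := by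
      rw [show (1 + ((k + 1 : Nat) : Int)) = (1 + (k : Int)) + 1 by push_cast; ring]
      exact PySem.List.pyRange_one_succ_right (by omega)
    rw [hsplit, List.foldl_append, ih hk']
    simp only [List.foldl]
    have hkk : k < rest.length := by omega
    have h1 : PySem.List.pyGetD (x :: rest) (1 + (k : Int)) 0 = rest[k] := by
      rw [show (1 + (k : Int)) = ((k + 1 : Nat) : Int) by push_cast; ring,
          PySem.List.pyGetD_natCast]
      simp [List.getD, List.getElem?_eq_getElem hkk]
    have h2 : PySem.List.pyGetD (pvPxs x (rest.take k)) (1 + (k : Int) - 1) 0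
        = (rest.take k).foldl PySem.Int.bxor x := by
      have hlen : ((rest.take k).length : Int) = (k : Int) := by
        simp [List.length_take, Nat.min_eq_left hk']
      rw [show (1 + (k : Int) - 1) = ((rest.take k).length : Int) by omega]
      exact pvPxs_last x (rest.take k)
    rw [h1, h2, show rest.take (k + 1) = rest.take k ++ [rest[k]] by
          rw [List.take_add_one]; simp [List.getElem?_eq_getElem hkk],
        pvPxs_append, PySem.Int.bxor_comm]

-- B's output loop, characterised
def pvOuts (mask : Int) : Int → List Int → List Int
  | _, [] => []
  | t, y :: ys => PySem.Int.bxor t mask :: pvOuts mask (PySem.Int.bxor t y) ys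

theorem pvB_loop (mask : Int) (l : List Int) (t : Int) (acc : List Int) :
    (l.foldl (fun (st : Int × List Int) y =>
        (PySem.Int.bxor st.1 y, st.2 ++ [PySem.Int.bxor st.1 mask])) (t, acc)).2
      = acc ++ pvOuts mask t l := by
  induction l generalizing t acc with
  | nil => simp [pvOuts]
  | cons y ys ih => simp [List.foldl, ih, pvOuts]

theorem pvOuts_reverse (mask a : Int) (l : List Int) :
    pvOuts mask (l.foldl PySem.Int.bxor a) ((a :: l).reverse)
      = ((pvPxs a l).map (fun i => PySem.Int.bxor i mask)).reverse := by
  induction l using List.reverseRecOn with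
  | nil => simp [pvOuts, pvPxs]
  | append_singleton l' y ih =>
    rw [show ((a :: (l' ++ [y])).reverse) = y :: (a :: l').reverse by simp,
        List.foldl_append]
    simp only [List.foldl, pvOuts, pv_bxor_cancel, ih, pvPxs_append]
    simp

-- ===== VERDICT (by name: the statement is the Claim_ definition above) =====
theorem getMaximumXor_spec : Claim_equal_getMaximumXor := by
  intro nums maximumBit _ hpre
  obtain ⟨hne, _⟩ := hpre
  unfold Spec_getMaximumXor
  match nums with
  | [] => exact absurd rfl hne
  | x :: rest =>
    unfold getMaximumXor getMaximumXor_alt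
    simp only
    have hA : (PySem.List.pyRange 1 ((x :: rest).length : Int) 1).foldl
        (fun presum i =>
          presum ++ [PySem.Int.bxor (PySem.List.pyGetD (x :: rest) i 0)
                                    (PySem.List.pyGetD presum (i - 1) 0)])
        [x] = pvPxs x rest := by
      have h := pvA_presum x rest rest.length (le_refl _)
      rw [List.take_length] at h
      rw [show ((x :: rest).length : Int) = 1 + (rest.length : Int) by push_cast [List.length_cons]; ring]
      exact h
    have hslice : PySem.List.slice (x :: rest) (some 1) none = rest := by
      rw [PySem.List.slice_from_one]; rfl
    rw [hA, hslice, pvFoldl_append_map, pvB_loop, pvOuts_reverse]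
    simp
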